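-- pv_equiv track=rewrite | github.com/dohung0770/advent-of-code | 2024/day10/main.py | part1
-- ===== SOURCE A (Python) =====
-- def part1(grid: list[list[int]]) -> int:
--     '''
--     Counts total scores of trailheads
--
--     A trailhead is a position starts with (0) and can reach a peak with value (9)
--     by moving uphill to the top|left|right|bottom adjacent position with height difference of exactly 1
--
--     Parameters:
--         grid (list[list[int]]): given map of heights
--
--     Returns:
--         int
--     '''
--
--     m, n = len(grid), len(grid[0])
--     delta = [(-1, 0), (1, 0), (0, -1), (0, 1)]
--
--     def dfs(r: int, c: int, visited: set[tuple[int, int]]) -> int: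
--         if grid[r][c] == 0:
--             return 1
--
--         tot = 0
--         for dx, dy in delta:
--             x, y = r + dx, c + dy
--
--             if 0 <= x < m and 0 <= y < n and grid[x][y] == grid[r][c] - 1 and (x, y) not in visited:
--                 visited.add((x, y))
--                 tot += dfs(x, y, visited)
--
--         return tot
--
--     ans = 0
--     for i in range(m):
--         for j in range(n):
--             if grid[i][j] == 9:
--                 ans += dfs(i, j, set([(i, j)]))
--
--     return ans
-- ===== SOURCE B (Python) =====
-- def part1(grid: list[list[int]]) -> int:
--     # Bottom-up DP by height instead of a DFS per trailhead: reach[(i,j)] is the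
--     # set of 0-cells reachable from (i,j) by descending steps of exactly 1.
--     m, n = len(grid), len(grid[0])
--     reach = {}
--     for h in range(10):
--         for i in range(m):
--             for j in range(n):
--                 if grid[i][j] == h:
--                     if h == 0:
--                         reach[(i, j)] = {(i, j)}
--                     else:
--                         s = set()
--                         for (x, y) in ((i - 1, j), (i + 1, j), (i, j - 1), (i, j + 1)):
--                             if 0 <= x < m and 0 <= y < n and grid[x][y] == h - 1:
--                                 s |= reach[(x, y)]
--                         reach[(i, j)] = s
--     ans = 0
--     for i in range(m):
--         for j in range(n):
--             if grid[i][j] == 9: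
--                 ans += len(reach[(i, j)])
--     return ans
-- ===== Notes on version B (the rewrite author's own statement) =====
-- stated objective: alternative
-- what changed: Replaces the per-trailhead recursive DFS with a shared visited set by a bottom-up dynamic program over heights 0..9 that propagates, level by level, the set of reachable 0-cells for every cell, then sums the set sizes at the 9-cells.
import Mathlib
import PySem

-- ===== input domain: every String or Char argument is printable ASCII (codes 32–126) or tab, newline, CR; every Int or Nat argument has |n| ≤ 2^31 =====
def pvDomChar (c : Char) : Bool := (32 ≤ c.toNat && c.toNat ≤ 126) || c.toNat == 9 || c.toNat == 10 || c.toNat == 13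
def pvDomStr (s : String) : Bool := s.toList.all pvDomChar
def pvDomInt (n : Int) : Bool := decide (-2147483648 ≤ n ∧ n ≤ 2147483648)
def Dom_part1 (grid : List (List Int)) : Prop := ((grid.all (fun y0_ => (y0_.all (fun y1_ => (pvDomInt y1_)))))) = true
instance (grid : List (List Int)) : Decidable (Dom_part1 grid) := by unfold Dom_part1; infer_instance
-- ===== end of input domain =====

-- B replaces A's per-trailhead recursive DFS by a bottom-up DP over heights 0..9 propagating
-- sets of reachable 0-cells (objective: alternative algorithm, same return value).

-- ===== PORT A =====
-- grid[r][c]; every access either program makes is in range under Pre_, so the defaults are never used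
def pvAt (g : List (List Int)) (r c : Int) : Int :=
  PySem.List.pyGetD (PySem.List.pyGetD g r []) c 0

def part1Delta : List (Int × Int) := [(-1, 0), (1, 0), (0, -1), (0, 1)]

-- A's dfs; the fuel only makes the recursion structural: dfs is entered at value-9 cells and the
-- value drops by exactly 1 per call, stopping at 0, so the depth is ≤ 10 and fuel 10 is never exhausted.
def part1Dfs (g : List (List Int)) (m n : Int) :
    Nat → Int → Int → PySem.Set (Int × Int) → Int × PySem.Set (Int × Int)
  | 0, _, _, visited => (0, visited)
  | fuel + 1, r, c, visited =>
    if pvAt g r c = 0 then (1, visited)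
    else
      part1Delta.foldl
        (fun st d =>
          let x := r + d.1
          let y := c + d.2
          if 0 ≤ x ∧ x < m ∧ 0 ≤ y ∧ y < n ∧ pvAt g x y = pvAt g r c - 1 ∧ ¬((x, y) ∈ st.2) then
            let res := part1Dfs g m n fuel x y (PySem.Set.add st.2 (x, y))
            (st.1 + res.1, res.2)
          else st)
        (0, visited)

def part1 (grid : List (List Int)) : Int :=
  let m : Int := grid.length
  let n : Int := (PySem.List.pyGetD grid 0 []).length
  (PySem.List.pyRange 0 m 1).foldl
    (fun ans i =>
      (PySem.List.pyRange 0 n 1).foldl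
        (fun ans j =>
          if pvAt grid i j = 9 then
            ans + (part1Dfs grid m n 10 i j (PySem.Set.ofList [(i, j)])).1
          else ans)
        ans)
    0

-- ===== PORT B =====
def part1AltNbrs (i j : Int) : List (Int × Int) := [(i - 1, j), (i + 1, j), (i, j - 1), (i, j + 1)]

-- one level-h scan of B's dynamic program
def part1AltScan (g : List (List Int)) (m n : Int)
    (reach : PySem.Dict (Int × Int) (PySem.Set (Int × Int))) (h : Int) :
    PySem.Dict (Int × Int) (PySem.Set (Int × Int)) :=
  (PySem.List.pyRange 0 m 1).foldl
    (fun reach i =>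
      (PySem.List.pyRange 0 n 1).foldl
        (fun reach j =>
          if pvAt g i j = h then
            if h = 0 then reach.insert (i, j) (PySem.Set.ofList [(i, j)])
            else
              -- Python's reach[(x,y)] never raises here: the key has height h-1, set at an earlier level
              let s :=
                (part1AltNbrs i j).foldl
                  (fun s q =>
                    if 0 ≤ q.1 ∧ q.1 < m ∧ 0 ≤ q.2 ∧ q.2 < n ∧ pvAt g q.1 q.2 = h - 1 then
                      PySem.Set.union s (reach.getD q PySem.Set.empty)
                    else s)
                  PySem.Set.empty
              reach.insert (i, j) s
          else reach)
        reach)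
    reach

def part1_alt (grid : List (List Int)) : Int :=
  let m : Int := grid.length
  let n : Int := (PySem.List.pyGetD grid 0 []).length
  let reach := (PySem.List.pyRange 0 10 1).foldl (part1AltScan grid m n) PySem.Dict.empty
  (PySem.List.pyRange 0 m 1).foldl
    (fun ans i =>
      (PySem.List.pyRange 0 n 1).foldl
        (fun ans j =>
          if pvAt grid i j = 9 then ans + PySem.Set.len (reach.getD (i, j) PySem.Set.empty)
          else ans)
        ans)
    0

-- ===== PRECONDITION & SPEC =====
-- Pre_ excludes exactly the inputs on which Python A raises IndexError: the empty grid
-- (grid[0]) and grids whose some row is shorter than row 0 (grid[i][j] for j < len(grid[0])).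
def Pre_part1 (grid : List (List Int)) : Prop :=
  grid ≠ [] ∧ ∀ row ∈ grid, (grid.headD []).length ≤ row.length

instance (grid : List (List Int)) : Decidable (Pre_part1 grid) := by unfold Pre_part1; infer_instance

def pvWitness_part1 : List (List Int) := [[9, 8, 7], [0, 1, 2], [1, 2, 3]]

def Spec_part1 (grid : List (List Int)) (out : Int) : Prop := out = part1_alt grid
instance (grid : List (List Int)) (out : Int) : Decidable (Spec_part1 grid out) := by unfold Spec_part1; infer_instance

-- ===== CLAIM (what is proved, stated in full; the proofs are below) =====
def Claim_equal_part1 : Prop := ∀ (grid : List (List Int)), Dom_part1 grid → Pre_part1 grid → Spec_part1 grid (part1 grid)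

-- ===== LEMMAS AND PROOFS =====

-- the true height of the cell p
def pvVal (g : List (List Int)) (p : Int × Int) : Int := pvAt g p.1 p.2

-- "q is an admissible downhill neighbour target at height hh": in bounds and of height hh - 1
def pvCond (g : List (List Int)) (m n hh : Int) (q : Int × Int) : Prop :=
  0 ≤ q.1 ∧ q.1 < m ∧ 0 ≤ q.2 ∧ q.2 < n ∧ pvVal g q = hh - 1

-- the set of 0-cells reachable from p by descending steps of exactly 1 (fuel-indexed)
def pvZF (g : List (List Int)) (m n : Int) : Nat → (Int × Int) → Finset (Int × Int)
  | 0, _ => ∅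
  | f + 1, p =>
    if pvVal g p = 0 then {p}
    else
      (part1Delta.map (fun d => (p.1 + d.1, p.2 + d.2))).foldr
        (fun q acc =>
          (if 0 ≤ q.1 ∧ q.1 < m ∧ 0 ≤ q.2 ∧ q.2 < n ∧ pvVal g q = pvVal g p - 1 then
              pvZF g m n f q
            else ∅) ∪ acc)
        ∅

def pvZ (g : List (List Int)) (m n : Int) (p : Int × Int) : Finset (Int × Int) :=
  pvZF g m n ((pvVal g p).toNat + 1) p

-- number of 0-cells of B \ A
def pvZC (g : List (List Int)) (A B : Finset (Int × Int)) : Nat :=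
  ((B \ A).filter (fun u => pvVal g u = 0)).card

lemma pv_mem_foldr_union {α : Type} [DecidableEq α] (F : (Int × Int) → Finset α) :
    ∀ (l : List (Int × Int)) (x : α),
      (x ∈ l.foldr (fun q acc => F q ∪ acc) ∅ ↔ ∃ q ∈ l, x ∈ F q) := by
  intro l x
  induction l with
  | nil => simp
  | cons a l ih => simp [List.foldr_cons, ih]

lemma pvZF_val_zero (g : List (List Int)) (m n : Int) :
    ∀ (f : Nat) (p x : Int × Int), x ∈ pvZF g m n f p → pvVal g x = 0 := by
  intro f
  induction f with
  | zero => intro p x hx; simp [pvZF] at hx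
  | succ f ih =>
    intro p x hx
    rw [pvZF] at hx
    by_cases h0 : pvVal g p = 0
    · rw [if_pos h0] at hx; simp at hx; subst hx; exact h0
    · rw [if_neg h0] at hx
      rw [pv_mem_foldr_union] at hx
      obtain ⟨q, _, hq⟩ := hx
      split_ifs at hq with hc
      · exact ih q x hq
      · simp at hq

lemma pvZ_of_zero (g : List (List Int)) (m n : Int) (p : Int × Int) (h : pvVal g p = 0) :
    pvZ g m n p = {p} := by
  rw [pvZ, pvZF, if_pos h]

lemma pvZ_mem_of_pos (g : List (List Int)) (m n : Int) (p : Int × Int) (hp : 1 ≤ pvVal g p)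
    (x : Int × Int) :
    x ∈ pvZ g m n p ↔
      ∃ d ∈ part1Delta, pvCond g m n (pvVal g p) (p.1 + d.1, p.2 + d.2) ∧
        x ∈ pvZ g m n (p.1 + d.1, p.2 + d.2) := by
  have h0 : ¬ pvVal g p = 0 := by omega
  rw [pvZ, pvZF, if_neg h0, pv_mem_foldr_union]
  constructor
  · rintro ⟨q, hql, hq⟩
    rw [List.mem_map] at hql
    obtain ⟨d, hd, rfl⟩ := hql
    split_ifs at hq with hc
    · refine ⟨d, hd, hc, ?_⟩
      have hv : pvVal g (p.1 + d.1, p.2 + d.2) = pvVal g p - 1 := hc.2.2.2.2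
      rw [pvZ, hv]
      have : (pvVal g p - 1).toNat + 1 = (pvVal g p).toNat := by omega
      rw [this]
      exact hq
    · simp at hq
  · rintro ⟨d, hd, hc, hx⟩
    refine ⟨(p.1 + d.1, p.2 + d.2), List.mem_map.mpr ⟨d, hd, rfl⟩, ?_⟩
    have hc' := hc
    rw [pvCond] at hc'
    rw [if_pos hc']
    have hv : pvVal g (p.1 + d.1, p.2 + d.2) = pvVal g p - 1 := hc.2.2.2.2
    rw [pvZ, hv] at hx
    have : (pvVal g p - 1).toNat + 1 = (pvVal g p).toNat := by omega
    rwa [this] at hx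

lemma pv_toFinset_add (s : PySem.Set (Int × Int)) (x : Int × Int) :
    (s.add x).toFinset = insert x s.toFinset := by
  rw [PySem.Set.add_eq_ite]
  split_ifs with h
  · rw [Finset.insert_eq_self.mpr (List.mem_toFinset.mpr h)]
  · ext y; simp [List.toFinset_append]

lemma pvZC_self (g : List (List Int)) (A : Finset (Int × Int)) : pvZC g A A = 0 := by
  simp [pvZC]

lemma pvZC_trans (g : List (List Int)) {A B C : Finset (Int × Int)} (h1 : A ⊆ B) (h2 : B ⊆ C) :
    pvZC g A C = pvZC g A B + pvZC g B C := by
  unfold pvZC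
  rw [← Finset.card_union_of_disjoint]
  · congr 1
    ext u
    simp only [Finset.mem_filter, Finset.mem_union, Finset.mem_sdiff]
    constructor
    · rintro ⟨⟨hC, hA⟩, h0⟩
      by_cases hB : u ∈ B
      · exact Or.inl ⟨⟨hB, hA⟩, h0⟩
      · exact Or.inr ⟨⟨hC, hB⟩, h0⟩
    · rintro (⟨⟨hB, hA⟩, h0⟩ | ⟨⟨hC, hB⟩, h0⟩)
      · exact ⟨⟨h2 hB, hA⟩, h0⟩
      · exact ⟨⟨hC, fun hA => hB (h1 hA)⟩, h0⟩
  · rw [Finset.disjoint_left]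
    intro u hu hu'
    simp only [Finset.mem_filter, Finset.mem_sdiff] at hu hu'
    exact hu'.1.2 hu.1.1

lemma pvZC_insert (g : List (List Int)) {A : Finset (Int × Int)} {w : Int × Int} (hw : w ∉ A) :
    pvZC g A (insert w A) = if pvVal g w = 0 then 1 else 0 := by
  unfold pvZC
  have : insert w A \ A = {w} := by
    ext u; simp only [Finset.mem_sdiff, Finset.mem_insert, Finset.mem_singleton]
    constructor
    · rintro ⟨h | h, hA⟩
      · exact h
      · exact absurd h hA
    · rintro rfl; exact ⟨Or.inl rfl, hw⟩
  rw [this, Finset.filter_singleton]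
  split_ifs <;> simp

-- the full induction package for A's dfs at a given amount of fuel
def pvDfsOK (g : List (List Int)) (m n : Int) (fuel : Nat) : Prop :=
  ∀ (r c : Int) (V : PySem.Set (Int × Int)),
    V.Nodup → (r, c) ∈ V → 0 ≤ pvVal g (r, c) → (pvVal g (r, c)).toNat + 1 ≤ fuel →
    (∀ u ∈ V, 0 ≤ pvVal g u → pvVal g u ≤ pvVal g (r, c) - 1 → pvZ g m n u ⊆ V.toFinset) →
    (part1Dfs g m n fuel r c V).2.Nodup ∧
    V.toFinset ⊆ (part1Dfs g m n fuel r c V).2.toFinset ∧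
    (∀ u ∈ (part1Dfs g m n fuel r c V).2.toFinset, u ∉ V.toFinset →
        0 ≤ pvVal g u ∧ pvVal g u < pvVal g (r, c) ∧
        pvZ g m n u ⊆ (part1Dfs g m n fuel r c V).2.toFinset) ∧
    (∀ u ∈ (part1Dfs g m n fuel r c V).2.toFinset, u ∉ V.toFinset → pvVal g u = 0 →
        u ∈ pvZ g m n (r, c)) ∧
    pvZ g m n (r, c) ⊆ (part1Dfs g m n fuel r c V).2.toFinset ∧
    (part1Dfs g m n fuel r c V).1 =
      (pvZC g V.toFinset (part1Dfs g m n fuel r c V).2.toFinset : Int) +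
        (if pvVal g (r, c) = 0 then 1 else 0)

lemma part1Dfs_fold (g : List (List Int)) (m n : Int) (fuel : Nat) (IH : pvDfsOK g m n fuel) :
    ∀ (ds : List (Int × Int)) (r c : Int) (tot : Int) (V : PySem.Set (Int × Int)),
      V.Nodup → 1 ≤ pvVal g (r, c) → (pvVal g (r, c)).toNat ≤ fuel →
      (∀ u ∈ V, 0 ≤ pvVal g u → pvVal g u ≤ pvVal g (r, c) - 1 → pvZ g m n u ⊆ V.toFinset) →
      ∀ res, res = ds.foldl
        (fun st d =>
          if 0 ≤ r + d.1 ∧ r + d.1 < m ∧ 0 ≤ c + d.2 ∧ c + d.2 < n ∧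
              pvAt g (r + d.1) (c + d.2) = pvAt g r c - 1 ∧ ¬((r + d.1, c + d.2) ∈ st.2) then
            (st.1 + (part1Dfs g m n fuel (r + d.1) (c + d.2) (PySem.Set.add st.2 (r + d.1, c + d.2))).1,
              (part1Dfs g m n fuel (r + d.1) (c + d.2) (PySem.Set.add st.2 (r + d.1, c + d.2))).2)
          else st)
        (tot, V) →
      res.2.Nodup ∧
      V.toFinset ⊆ res.2.toFinset ∧
      (∀ u ∈ res.2.toFinset, u ∉ V.toFinset →
          0 ≤ pvVal g u ∧ pvVal g u < pvVal g (r, c) ∧ pvZ g m n u ⊆ res.2.toFinset) ∧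
      (∀ u ∈ res.2.toFinset, u ∉ V.toFinset → pvVal g u = 0 →
          ∃ d ∈ ds, pvCond g m n (pvVal g (r, c)) (r + d.1, c + d.2) ∧
            u ∈ pvZ g m n (r + d.1, c + d.2)) ∧
      (∀ d ∈ ds, pvCond g m n (pvVal g (r, c)) (r + d.1, c + d.2) →
          pvZ g m n (r + d.1, c + d.2) ⊆ res.2.toFinset) ∧
      res.1 = tot + (pvZC g V.toFinset res.2.toFinset : Int) := by
  intro ds
  induction ds with
  | nil =>
    rintro r c tot V hnd h1 hfuel hInv res rfl
    refine ⟨hnd, Finset.Subset.refl _, ?_, ?_, ?_, ?_⟩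
    · intro u hu hnu; exact absurd hu hnu
    · intro u hu hnu; exact absurd hu hnu
    · intro d hd; exact absurd hd (List.not_mem_nil)
    · simp [pvZC_self]
  | cons d ds ih =>
    rintro r c tot V hnd h1 hfuel hInv res rfl
    rw [List.foldl_cons]
    by_cases hc : 0 ≤ r + d.1 ∧ r + d.1 < m ∧ 0 ≤ c + d.2 ∧ c + d.2 < n ∧
        pvAt g (r + d.1) (c + d.2) = pvAt g r c - 1 ∧ ¬((r + d.1, c + d.2) ∈ (tot, V).2)
    · rw [if_pos hc]
      obtain ⟨hb1, hb2, hb3, hb4, hb5, hb6⟩ := hc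
      have hwn : (r + d.1, c + d.2) ∉ V := hb6
      have hnd1 : (PySem.Set.add V (r + d.1, c + d.2)).Nodup := PySem.Set.nodup_add _ _ hnd
      have hwmem : (r + d.1, c + d.2) ∈ PySem.Set.add V (r + d.1, c + d.2) :=
        (PySem.Set.mem_add _ _ _).mpr (Or.inr rfl)
      have hvw : pvVal g (r + d.1, c + d.2) = pvVal g (r, c) - 1 := hb5
      have hV1f : (PySem.Set.add V (r + d.1, c + d.2)).toFinset
          = insert (r + d.1, c + d.2) V.toFinset := pv_toFinset_add _ _
      have hVsub1 : V.toFinset ⊆ (PySem.Set.add V (r + d.1, c + d.2)).toFinset := by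
        rw [hV1f]; exact Finset.subset_insert _ _
      have hInv1 : ∀ u ∈ PySem.Set.add V (r + d.1, c + d.2), 0 ≤ pvVal g u →
          pvVal g u ≤ pvVal g (r + d.1, c + d.2) - 1 →
          pvZ g m n u ⊆ (PySem.Set.add V (r + d.1, c + d.2)).toFinset := by
        intro u hu h0u hle
        rcases (PySem.Set.mem_add _ _ _).mp hu with hu | rfl
        · exact (hInv u hu h0u (by omega)).trans hVsub1
        · omega
      obtain ⟨P1, P2, P3, P4, P5, P6⟩ := IH (r + d.1) (c + d.2)
        (PySem.Set.add V (r + d.1, c + d.2)) hnd1 hwmem (by omega) (by omega) hInv1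
      set Vw := (part1Dfs g m n fuel (r + d.1) (c + d.2) (PySem.Set.add V (r + d.1, c + d.2))).2
        with hVw
      set tw := (part1Dfs g m n fuel (r + d.1) (c + d.2) (PySem.Set.add V (r + d.1, c + d.2))).1
        with htw
      have hV1subW : (PySem.Set.add V (r + d.1, c + d.2)).toFinset ⊆ Vw.toFinset := P2
      have hInvW : ∀ u ∈ Vw, 0 ≤ pvVal g u → pvVal g u ≤ pvVal g (r, c) - 1 →
          pvZ g m n u ⊆ Vw.toFinset := by
        intro u hu h0u hle
        by_cases huV1 : u ∈ PySem.Set.add V (r + d.1, c + d.2)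
        · rcases (PySem.Set.mem_add _ _ _).mp huV1 with huV | rfl
          · exact (hInv u huV h0u hle).trans (hVsub1.trans hV1subW)
          · exact P5
        · exact (P3 u (List.mem_toFinset.mpr hu)
            (fun hx => huV1 (List.mem_toFinset.mp hx))).2.2
      obtain ⟨F1, F2, F3, F4, F5, F6⟩ := ih r c (tot + tw) Vw P1 h1 hfuel hInvW _ rfl
      set resf := (ds.foldl _ (tot + tw, Vw)) with hresf
      have hWsubF : Vw.toFinset ⊆ resf.2.toFinset := F2
      have hVsubF : V.toFinset ⊆ resf.2.toFinset := (hVsub1.trans hV1subW).trans hWsubF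
      have hcondd : pvCond g m n (pvVal g (r, c)) (r + d.1, c + d.2) :=
        ⟨hb1, hb2, hb3, hb4, hb5⟩
      refine ⟨F1, hVsubF, ?_, ?_, ?_, ?_⟩
      · -- new cells
        intro u hu hnu
        by_cases huW : u ∈ Vw.toFinset
        · by_cases huV1 : u ∈ (PySem.Set.add V (r + d.1, c + d.2)).toFinset
          · have : u = (r + d.1, c + d.2) := by
              rw [hV1f] at huV1
              rcases Finset.mem_insert.mp huV1 with h | h
              · exact h
              · exact absurd h hnu
            subst this
            exact ⟨by omega, by omega, P5.trans hWsubF⟩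
          · obtain ⟨ha, hbv, hz⟩ := P3 u huW huV1
            exact ⟨ha, by omega, hz.trans hWsubF⟩
        · obtain ⟨ha, hbv, hz⟩ := F3 u hu huW
          exact ⟨ha, hbv, hz⟩
      · -- zeros provenance
        intro u hu hnu h0u
        by_cases huW : u ∈ Vw.toFinset
        · by_cases huV1 : u ∈ (PySem.Set.add V (r + d.1, c + d.2)).toFinset
          · have : u = (r + d.1, c + d.2) := by
              rw [hV1f] at huV1
              rcases Finset.mem_insert.mp huV1 with h | h
              · exact h
              · exact absurd h hnu
            subst this
            refine ⟨d, List.mem_cons_self, hcondd, ?_⟩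
            rw [pvZ_of_zero g m n _ h0u]
            exact Finset.mem_singleton_self _
          · exact ⟨d, List.mem_cons_self, hcondd, P4 u huW huV1 h0u⟩
        · obtain ⟨d', hd', hcd', hzd'⟩ := F4 u hu huW h0u
          exact ⟨d', List.mem_cons_of_mem d hd', hcd', hzd'⟩
      · -- closure of the processed directions
        intro d' hd' hcd'
        rcases List.mem_cons.mp hd' with rfl | hd'
        · exact P5.trans hWsubF
        · exact F5 d' hd' hcd'
      · -- the count
        have hZC1 : pvZC g V.toFinset (PySem.Set.add V (r + d.1, c + d.2)).toFinset
            = if pvVal g (r + d.1, c + d.2) = 0 then 1 else 0 := by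
          rw [hV1f]
          exact pvZC_insert g (fun hx => hwn (List.mem_toFinset.mp hx))
        have hsplit : pvZC g V.toFinset resf.2.toFinset
            = pvZC g V.toFinset (PySem.Set.add V (r + d.1, c + d.2)).toFinset
              + pvZC g (PySem.Set.add V (r + d.1, c + d.2)).toFinset resf.2.toFinset :=
          pvZC_trans g hVsub1 (hV1subW.trans hWsubF)
        have hsplit2 : pvZC g (PySem.Set.add V (r + d.1, c + d.2)).toFinset resf.2.toFinset
            = pvZC g (PySem.Set.add V (r + d.1, c + d.2)).toFinset Vw.toFinset
              + pvZC g Vw.toFinset resf.2.toFinset :=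
          pvZC_trans g hV1subW hWsubF
        rw [F6, P6, hsplit, hsplit2, hZC1]
        split_ifs <;> push_cast <;> ring
    · rw [if_neg hc]
      obtain ⟨F1, F2, F3, F4, F5, F6⟩ := ih r c tot V hnd h1 hfuel hInv _ rfl
      refine ⟨F1, F2, F3, ?_, ?_, F6⟩
      · intro u hu hnu h0u
        obtain ⟨d', hd', hcd', hzd'⟩ := F4 u hu hnu h0u
        exact ⟨d', List.mem_cons_of_mem d hd', hcd', hzd'⟩
      · intro d' hd' hcd'
        rcases List.mem_cons.mp hd' with rfl | hd'
        · -- the direction d was skipped: its target must already be in V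
          obtain ⟨k1, k2, k3, k4, k5⟩ := hcd'
          have hmem : (r + d'.1, c + d'.2) ∈ V := by
            by_contra hnm
            exact hc ⟨k1, k2, k3, k4, k5, hnm⟩
          have h0w : 0 ≤ pvVal g (r + d'.1, c + d'.2) := by
            have := k5; omega
          exact (hInv _ hmem h0w (le_of_eq k5)).trans F2
        · exact F5 d' hd' hcd'

lemma part1Dfs_main (g : List (List Int)) (m n : Int) : ∀ fuel, pvDfsOK g m n fuel := by
  intro fuel
  induction fuel with
  | zero => intro r c V _ _ _ hf _; omega
  | succ fuel IH =>
    intro r c V hnd hmem h0 hf hInv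
    by_cases hz : pvAt g r c = 0
    · have hres : part1Dfs g m n (fuel + 1) r c V = (1, V) := by
        rw [part1Dfs, if_pos hz]
      rw [hres]
      have hvz : pvVal g (r, c) = 0 := hz
      refine ⟨hnd, Finset.Subset.refl _, ?_, ?_, ?_, ?_⟩
      · intro u hu hnu; exact absurd hu hnu
      · intro u hu hnu; exact absurd hu hnu
      · rw [pvZ_of_zero g m n _ hvz]
        intro x hx
        rw [Finset.mem_singleton] at hx
        subst hx
        exact List.mem_toFinset.mpr hmem
      · rw [if_pos hvz, pvZC_self]; simp
    · have h11 : 1 ≤ pvVal g (r, c) := by have : pvVal g (r, c) ≠ 0 := hz; omega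
      have hres : part1Dfs g m n (fuel + 1) r c V =
          part1Delta.foldl
            (fun st d =>
              if 0 ≤ r + d.1 ∧ r + d.1 < m ∧ 0 ≤ c + d.2 ∧ c + d.2 < n ∧
                  pvAt g (r + d.1) (c + d.2) = pvAt g r c - 1 ∧ ¬((r + d.1, c + d.2) ∈ st.2) then
                (st.1 + (part1Dfs g m n fuel (r + d.1) (c + d.2)
                    (PySem.Set.add st.2 (r + d.1, c + d.2))).1,
                  (part1Dfs g m n fuel (r + d.1) (c + d.2)
                    (PySem.Set.add st.2 (r + d.1, c + d.2))).2)
              else st)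
            (0, V) := by
        rw [part1Dfs, if_neg hz]
      rw [hres]
      obtain ⟨F1, F2, F3, F4, F5, F6⟩ := part1Dfs_fold g m n fuel IH part1Delta r c 0 V
        hnd h11 (by omega) hInv _ rfl
      refine ⟨F1, F2, F3, ?_, ?_, ?_⟩
      · intro u hu hnu h0u
        rw [pvZ_mem_of_pos g m n _ h11]
        exact F4 u hu hnu h0u
      · intro x hx
        rw [pvZ_mem_of_pos g m n _ h11] at hx
        obtain ⟨d, hd, hcd, hxd⟩ := hx
        exact F5 d hd hcd hxd
      · rw [F6, if_neg (show ¬ pvVal g (r, c) = 0 from hz)]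
        ring

lemma part1Dfs_count (g : List (List Int)) (m n : Int) (i j : Int) (h9 : pvAt g i j = 9) :
    (part1Dfs g m n 10 i j (PySem.Set.ofList [(i, j)])).1 = ((pvZ g m n (i, j)).card : Int) := by
  have hv9 : pvVal g (i, j) = 9 := h9
  have hV0 : PySem.Set.ofList [(i, j)] = [(i, j)] := rfl
  have hnd : (PySem.Set.ofList [(i, j)]).Nodup := PySem.Set.nodup_ofList _
  have hmem : (i, j) ∈ PySem.Set.ofList [(i, j)] := by rw [hV0]; exact List.mem_singleton_self _
  have hInv : ∀ u ∈ PySem.Set.ofList [(i, j)], 0 ≤ pvVal g u →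
      pvVal g u ≤ pvVal g (i, j) - 1 → pvZ g m n u ⊆ (PySem.Set.ofList [(i, j)]).toFinset := by
    intro u hu h0u hle
    rw [hV0, List.mem_singleton] at hu
    subst hu
    omega
  obtain ⟨P1, P2, P3, P4, P5, P6⟩ := part1Dfs_main g m n 10 i j (PySem.Set.ofList [(i, j)])
    hnd hmem (by omega) (by rw [hv9]; norm_num) hInv
  set V' := (part1Dfs g m n 10 i j (PySem.Set.ofList [(i, j)])).2 with hV'
  have hV0f : (PySem.Set.ofList [(i, j)]).toFinset = {(i, j)} := by rw [hV0]; simp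
  have hset : (V'.toFinset \ {(i, j)}).filter (fun u => pvVal g u = 0) = pvZ g m n (i, j) := by
    ext u
    simp only [Finset.mem_filter, Finset.mem_sdiff, Finset.mem_singleton]
    constructor
    · rintro ⟨⟨huV, hune⟩, h0u⟩
      exact P4 u huV (by rw [hV0f, Finset.mem_singleton]; exact hune) h0u
    · intro hu
      have h0u : pvVal g u = 0 := pvZF_val_zero g m n _ _ _ hu
      refine ⟨⟨P5 hu, ?_⟩, h0u⟩
      rintro rfl
      rw [hv9] at h0u
      norm_num at h0u
    
  rw [P6, if_neg (by rw [hv9]; norm_num)]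
  unfold pvZC
  rw [hV0f, hset]
  ring

-- ===== B-side lemmas =====

def pvGood (g : List (List Int)) (m n : Int)
    (reach : PySem.Dict (Int × Int) (PySem.Set (Int × Int))) (p : Int × Int) : Prop :=
  ∃ s, reach.get? p = some s ∧ s.Nodup ∧ s.toFinset = pvZ g m n p

def pvInvB (g : List (List Int)) (m n : Int)
    (reach : PySem.Dict (Int × Int) (PySem.Set (Int × Int))) (hh : Int) : Prop :=
  ∀ p : Int × Int, 0 ≤ p.1 → p.1 < m → 0 ≤ p.2 → p.2 < n →
    0 ≤ pvVal g p → pvVal g p ≤ hh → pvGood g m n reach p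

lemma pv_foldl_union (C : Int × Int → Prop) [DecidablePred C]
    (f : Int × Int → PySem.Set (Int × Int)) :
    ∀ (l : List (Int × Int)) (s0 : PySem.Set (Int × Int)), s0.Nodup →
      (l.foldl (fun s q => if C q then PySem.Set.union s (f q) else s) s0).Nodup ∧
      ∀ x, x ∈ l.foldl (fun s q => if C q then PySem.Set.union s (f q) else s) s0 ↔
            (x ∈ s0 ∨ ∃ q ∈ l, C q ∧ x ∈ f q) := by
  intro l
  induction l with
  | nil => intro s0 h; simpa using h
  | cons a l ih =>
    intro s0 h0
    rw [List.foldl_cons]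
    by_cases hC : C a
    · rw [if_pos hC]
      obtain ⟨hn, hm⟩ := ih (PySem.Set.union s0 (f a)) (PySem.Set.nodup_union s0 (f a) h0)
      refine ⟨hn, fun x => ?_⟩
      rw [hm x, PySem.Set.mem_union]
      constructor
      · rintro ((h | h) | ⟨q, hq, hCq, hfq⟩)
        · exact Or.inl h
        · exact Or.inr ⟨a, List.mem_cons_self, hC, h⟩
        · exact Or.inr ⟨q, List.mem_cons_of_mem a hq, hCq, hfq⟩
      · rintro (h | ⟨q, hq, hCq, hfq⟩)
        · exact Or.inl (Or.inl h)
        · rcases List.mem_cons.mp hq with rfl | hq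
          · exact Or.inl (Or.inr hfq)
          · exact Or.inr ⟨q, hq, hCq, hfq⟩
    · rw [if_neg hC]
      obtain ⟨hn, hm⟩ := ih s0 h0
      refine ⟨hn, fun x => ?_⟩
      rw [hm x]
      constructor
      · rintro (h | ⟨q, hq, hCq, hfq⟩)
        · exact Or.inl h
        · exact Or.inr ⟨q, List.mem_cons_of_mem a hq, hCq, hfq⟩
      · rintro (h | ⟨q, hq, hCq, hfq⟩)
        · exact Or.inl h
        · rcases List.mem_cons.mp hq with rfl | hq
          · exact absurd hCq hC
          · exact Or.inr ⟨q, hq, hCq, hfq⟩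

-- correctness of the value B stores at a cell of height hh

lemma pvNbrs_eq (i j : Int) :
    part1AltNbrs i j = part1Delta.map (fun d => (i + d.1, j + d.2)) := by
  simp only [part1AltNbrs, part1Delta, List.map_cons, List.map_nil]
  norm_num [sub_eq_add_neg]

lemma pvStepVal (g : List (List Int)) (m n hh i j : Int) (h0 : 0 ≤ hh)
    (reach : PySem.Dict (Int × Int) (PySem.Set (Int × Int)))
    (hGL : ∀ p : Int × Int, 0 ≤ p.1 → p.1 < m → 0 ≤ p.2 → p.2 < n →
        0 ≤ pvVal g p → pvVal g p ≤ hh - 1 → pvGood g m n reach p)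
    (hg : pvAt g i j = hh) :
    pvGood g m n
      (if hh = 0 then reach.insert (i, j) (PySem.Set.ofList [(i, j)])
       else
         reach.insert (i, j)
           ((part1AltNbrs i j).foldl
             (fun s q =>
               if 0 ≤ q.1 ∧ q.1 < m ∧ 0 ≤ q.2 ∧ q.2 < n ∧ pvAt g q.1 q.2 = hh - 1 then
                 PySem.Set.union s (reach.getD q PySem.Set.empty)
               else s)
             PySem.Set.empty))
      (i, j) := by
  have hv : pvVal g (i, j) = hh := hg
  by_cases hz : hh = 0
  · rw [if_pos hz]
    refine ⟨PySem.Set.ofList [(i, j)], PySem.Dict.get?_insert_self _ _ _, PySem.Set.nodup_ofList _, ?_⟩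
    have : PySem.Set.ofList [(i, j)] = [(i, j)] := rfl
    rw [this, pvZ_of_zero g m n (i, j) (by rw [hv, hz])]
    simp
  · rw [if_neg hz]
    have hh1 : 1 ≤ hh := by omega
    obtain ⟨hn, hm⟩ := pv_foldl_union
      (fun q : Int × Int => 0 ≤ q.1 ∧ q.1 < m ∧ 0 ≤ q.2 ∧ q.2 < n ∧ pvAt g q.1 q.2 = hh - 1)
      (fun q => reach.getD q PySem.Set.empty) (part1AltNbrs i j) PySem.Set.empty List.nodup_nil
    refine ⟨_, PySem.Dict.get?_insert_self _ _ _, hn, ?_⟩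
    ext x
    rw [List.mem_toFinset, hm x]
    simp only [pvNbrs_eq i j, List.mem_map]
    rw [pvZ_mem_of_pos g m n (i, j) (by rw [hv]; exact hh1), hv]
    constructor
    · rintro (h | ⟨q, ⟨d, hd, rfl⟩, hCq, hfq⟩)
      · exact absurd h (List.not_mem_nil)
      · refine ⟨d, hd, hCq, ?_⟩
        obtain ⟨h1, h2, h3, h4, h5⟩ := hCq
        have h5' : pvVal g (i + d.1, j + d.2) = hh - 1 := h5
        obtain ⟨sq, hget, hnd, htf⟩ := hGL _ h1 h2 h3 h4 (by omega) (le_of_eq h5')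
        rw [PySem.Dict.getD_of_get?_eq_some _ _ hget] at hfq
        rw [← htf]
        exact List.mem_toFinset.mpr hfq
    · rintro ⟨d, hd, hCq, hx⟩
      refine Or.inr ⟨(i + d.1, j + d.2), ⟨d, hd, rfl⟩, hCq, ?_⟩
      obtain ⟨h1, h2, h3, h4, h5⟩ := hCq
      have h5' : pvAt g (i + d.1, j + d.2).1 (i + d.1, j + d.2).2 = hh - 1 := h5
      obtain ⟨sq, hget, hnd, htf⟩ := hGL _ h1 h2 h3 h4 (by omega) (le_of_eq h5)
      rw [PySem.Dict.getD_of_get?_eq_some _ _ hget]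
      rw [← htf] at hx
      exact List.mem_toFinset.mp hx

lemma pvScanJ (g : List (List Int)) (m n hh i : Int) (h0 : 0 ≤ hh) :
    ∀ (js : List Int) (reach : PySem.Dict (Int × Int) (PySem.Set (Int × Int))),
      (∀ p : Int × Int, 0 ≤ p.1 → p.1 < m → 0 ≤ p.2 → p.2 < n →
          0 ≤ pvVal g p → pvVal g p ≤ hh - 1 → pvGood g m n reach p) →
      ∀ res, res = js.foldl
        (fun reach j =>
          if pvAt g i j = hh then
            if hh = 0 then reach.insert (i, j) (PySem.Set.ofList [(i, j)])
            else
              reach.insert (i, j)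
                ((part1AltNbrs i j).foldl
                  (fun s q =>
                    if 0 ≤ q.1 ∧ q.1 < m ∧ 0 ≤ q.2 ∧ q.2 < n ∧ pvAt g q.1 q.2 = hh - 1 then
                      PySem.Set.union s (reach.getD q PySem.Set.empty)
                    else s)
                  PySem.Set.empty)
          else reach)
        reach →
      (∀ p, pvGood g m n reach p → pvGood g m n res p) ∧
      (∀ j ∈ js, pvVal g (i, j) = hh → pvGood g m n res (i, j)) := by
  intro js
  induction js with
  | nil => rintro reach _ res rfl; exact ⟨fun p h => h, by simp⟩
  | cons j js ih =>
    rintro reach hGL res rfl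
    rw [List.foldl_cons]
    set reach1 := (if pvAt g i j = hh then
            if hh = 0 then reach.insert (i, j) (PySem.Set.ofList [(i, j)])
            else
              reach.insert (i, j)
                ((part1AltNbrs i j).foldl
                  (fun s q =>
                    if 0 ≤ q.1 ∧ q.1 < m ∧ 0 ≤ q.2 ∧ q.2 < n ∧ pvAt g q.1 q.2 = hh - 1 then
                      PySem.Set.union s (reach.getD q PySem.Set.empty)
                    else s)
                  PySem.Set.empty)
          else reach) with hreach1
    have hpres1 : ∀ p, pvGood g m n reach p → pvGood g m n reach1 p := by
      intro p hp
      rw [hreach1]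
      by_cases hg : pvAt g i j = hh
      · rw [if_pos hg]
        by_cases hpij : p = (i, j)
        · subst hpij
          exact pvStepVal g m n hh i j h0 reach hGL hg
        · obtain ⟨s, hget, hs⟩ := hp
          split_ifs with hz
          · exact ⟨s, by rw [PySem.Dict.get?_insert_of_ne _ _ hpij]; exact hget, hs⟩
          · exact ⟨s, by rw [PySem.Dict.get?_insert_of_ne _ _ hpij]; exact hget, hs⟩
      · rw [if_neg hg]; exact hp
    have hGL1 : ∀ p : Int × Int, 0 ≤ p.1 → p.1 < m → 0 ≤ p.2 → p.2 < n →
        0 ≤ pvVal g p → pvVal g p ≤ hh - 1 → pvGood g m n reach1 p :=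
      fun p a b c d e f => hpres1 p (hGL p a b c d e f)
    obtain ⟨hpres2, hdone2⟩ := ih reach1 hGL1 _ rfl
    refine ⟨fun p hp => hpres2 p (hpres1 p hp), ?_⟩
    intro j' hj' hvj'
    rcases List.mem_cons.mp hj' with rfl | hj'
    · refine hpres2 _ ?_
      have hg : pvAt g i j' = hh := hvj'
      rw [hreach1, if_pos hg]
      exact pvStepVal g m n hh i j' h0 reach hGL hg
    · exact hdone2 j' hj' hvj'

lemma pvScanI (g : List (List Int)) (m n hh : Int) (h0 : 0 ≤ hh) :
    ∀ (is : List Int) (reach : PySem.Dict (Int × Int) (PySem.Set (Int × Int))),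
      (∀ p : Int × Int, 0 ≤ p.1 → p.1 < m → 0 ≤ p.2 → p.2 < n →
          0 ≤ pvVal g p → pvVal g p ≤ hh - 1 → pvGood g m n reach p) →
      ∀ res, res = is.foldl
        (fun reach i =>
          (PySem.List.pyRange 0 n 1).foldl
            (fun reach j =>
              if pvAt g i j = hh then
                if hh = 0 then reach.insert (i, j) (PySem.Set.ofList [(i, j)])
                else
                  reach.insert (i, j)
                    ((part1AltNbrs i j).foldl
                      (fun s q =>
                        if 0 ≤ q.1 ∧ q.1 < m ∧ 0 ≤ q.2 ∧ q.2 < n ∧ pvAt g q.1 q.2 = hh - 1 then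
                          PySem.Set.union s (reach.getD q PySem.Set.empty)
                        else s)
                      PySem.Set.empty)
              else reach)
            reach)
        reach →
      (∀ p, pvGood g m n reach p → pvGood g m n res p) ∧
      (∀ i ∈ is, ∀ j ∈ PySem.List.pyRange 0 n 1, pvVal g (i, j) = hh → pvGood g m n res (i, j)) := by
  intro is
  induction is with
  | nil => rintro reach _ res rfl; exact ⟨fun p h => h, by simp⟩
  | cons i is ih =>
    rintro reach hGL res rfl
    rw [List.foldl_cons]
    obtain ⟨hpres1, hdone1⟩ := pvScanJ g m n hh i h0 (PySem.List.pyRange 0 n 1) reach hGL _ rfl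
    have hGL1 : ∀ p : Int × Int, 0 ≤ p.1 → p.1 < m → 0 ≤ p.2 → p.2 < n →
        0 ≤ pvVal g p → pvVal g p ≤ hh - 1 → pvGood g m n _ p :=
      fun p a b c d e f => hpres1 p (hGL p a b c d e f)
    obtain ⟨hpres2, hdone2⟩ := ih _ hGL1 _ rfl
    refine ⟨fun p hp => hpres2 p (hpres1 p hp), ?_⟩
    intro i' hi' j hj hv
    rcases List.mem_cons.mp hi' with rfl | hi'
    · exact hpres2 _ (hdone1 j hj hv)
    · exact hdone2 i' hi' j hj hv

lemma pvScanLevel (g : List (List Int)) (m n hh : Int) (h0 : 0 ≤ hh)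
    (reach : PySem.Dict (Int × Int) (PySem.Set (Int × Int)))
    (hGL : pvInvB g m n reach (hh - 1)) :
    pvInvB g m n (part1AltScan g m n reach hh) hh := by
  obtain ⟨hpres, hdone⟩ := pvScanI g m n hh h0 (PySem.List.pyRange 0 m 1) reach hGL
    (part1AltScan g m n reach hh) rfl
  rintro ⟨p1, p2⟩ h1 h2 h3 h4 h5 h6
  by_cases hv : pvVal g (p1, p2) = hh
  · exact hdone p1 (PySem.List.mem_pyRange_one.mpr ⟨h1, h2⟩) p2
      (PySem.List.mem_pyRange_one.mpr ⟨h3, h4⟩) hv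
  · exact hpres _ (hGL (p1, p2) h1 h2 h3 h4 h5 (by omega))

lemma pvReachFinal (g : List (List Int)) (m n : Int) :
    pvInvB g m n ((PySem.List.pyRange 0 10 1).foldl (part1AltScan g m n) PySem.Dict.empty) 9 := by
  have h10 : PySem.List.pyRange 0 10 1 = [0, 1, 2, 3, 4, 5, 6, 7, 8, 9] := by decide
  rw [h10]
  simp only [List.foldl_cons, List.foldl_nil]
  have i0 : pvInvB g m n PySem.Dict.empty (0 - 1) := by
    intro p _ _ _ _ h5 h6; omega
  have e0 := pvScanLevel g m n 0 (by norm_num) _ i0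
  have e1 := pvScanLevel g m n 1 (by norm_num) _ ((by norm_num : (1:Int) - 1 = 0) ▸ e0)
  have e2 := pvScanLevel g m n 2 (by norm_num) _ ((by norm_num : (2:Int) - 1 = 1) ▸ e1)
  have e3 := pvScanLevel g m n 3 (by norm_num) _ ((by norm_num : (3:Int) - 1 = 2) ▸ e2)
  have e4 := pvScanLevel g m n 4 (by norm_num) _ ((by norm_num : (4:Int) - 1 = 3) ▸ e3)
  have e5 := pvScanLevel g m n 5 (by norm_num) _ ((by norm_num : (5:Int) - 1 = 4) ▸ e4)
  have e6 := pvScanLevel g m n 6 (by norm_num) _ ((by norm_num : (6:Int) - 1 = 5) ▸ e5)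
  have e7 := pvScanLevel g m n 7 (by norm_num) _ ((by norm_num : (7:Int) - 1 = 6) ▸ e6)
  have e8 := pvScanLevel g m n 8 (by norm_num) _ ((by norm_num : (8:Int) - 1 = 7) ▸ e7)
  have e9 := pvScanLevel g m n 9 (by norm_num) _ ((by norm_num : (9:Int) - 1 = 8) ▸ e8)
  exact e9

lemma part1_eq_alt (grid : List (List Int)) : part1 grid = part1_alt grid := by
  simp only [part1, part1_alt]
  set m : Int := (grid.length : Int) with hm
  set n : Int := ((PySem.List.pyGetD grid 0 []).length : Int) with hn
  set reach := (PySem.List.pyRange 0 10 1).foldl (part1AltScan grid m n) PySem.Dict.empty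
    with hreach
  have hfin : pvInvB grid m n reach 9 := pvReachFinal grid m n
  -- A's sum: replace each dfs count by the size of the reachable-zeros set
  have hA : ∀ i : Int,
      (fun ans j => if pvAt grid i j = 9 then
          ans + (part1Dfs grid m n 10 i j (PySem.Set.ofList [(i, j)])).1 else ans)
      = (fun (ans : Int) (j : Int) => if pvAt grid i j = 9 then
          ans + ((pvZ grid m n (i, j)).card : Int) else ans) := by
    intro i
    funext ans j
    by_cases h9 : pvAt grid i j = 9
    · rw [if_pos h9, if_pos h9, part1Dfs_count grid m n i j h9]
    · rw [if_neg h9, if_neg h9]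
  have hAA : (PySem.List.pyRange 0 m 1).foldl
      (fun ans i => (PySem.List.pyRange 0 n 1).foldl
        (fun ans j => if pvAt grid i j = 9 then
            ans + (part1Dfs grid m n 10 i j (PySem.Set.ofList [(i, j)])).1 else ans) ans) 0
      = (PySem.List.pyRange 0 m 1).foldl
      (fun ans i => (PySem.List.pyRange 0 n 1).foldl
        (fun ans j => if pvAt grid i j = 9 then
            ans + ((pvZ grid m n (i, j)).card : Int) else ans) ans) 0 := by
    apply PySem.List.foldl_congr_mem
    intro ans i _
    rw [hA i]
  rw [hAA]
  -- B's sum: replace each stored set's length by the same cardinality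
  apply Eq.symm
  apply PySem.List.foldl_congr_mem
  intro ans i hi
  apply PySem.List.foldl_congr_mem
  intro ans' j hj
  by_cases h9 : pvAt grid i j = 9
  · rw [if_pos h9, if_pos h9]
    obtain ⟨hi0, him⟩ := PySem.List.mem_pyRange_one.mp hi
    obtain ⟨hj0, hjn⟩ := PySem.List.mem_pyRange_one.mp hj
    have hv9 : pvVal grid (i, j) = 9 := h9
    obtain ⟨s, hget, hsnd, hstf⟩ := hfin (i, j) hi0 him hj0 hjn (by omega) (by omega)
    rw [PySem.Dict.getD_of_get?_eq_some _ _ hget]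
    have hlen : PySem.Set.len s = (s.length : Int) := rfl
    rw [hlen, ← List.toFinset_card_of_nodup hsnd, hstf]
  · rw [if_neg h9, if_neg h9]

-- ===== VERDICT (by name: the statement is the Claim_ definition above) =====
theorem part1_spec : Claim_equal_part1 := by
  intro grid _ _
  unfold Spec_part1
  exact part1_eq_alt grid
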